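-- pv_equiv track=rewrite | github.com/Caume/HerraduraKEx | SecurityProofsCode/hkex_nl_verification.py | build_negacyclic_matrix
-- ===== SOURCE A (Python) =====
-- def build_negacyclic_matrix(f, q, n):
--     """
--     Build negacyclic circulant matrix C for multiplication by f in Z_q[x]/(x^n+1).
--
--     (C · g_vec)[i] = (f·g mod x^n+1)[i]
--
--     Derivation: (f·g)[i] = sum_{k=0}^{i} f[k]*g[i-k]  -  sum_{k=i+1}^{n-1} f[k]*g[i-k+n]
--     So  C[i][j] = f[(i-j) mod n] * (+1 if j <= i, -1 if j > i)  mod q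
--     """
--     mat = []
--     for i in range(n):
--         row = []
--         for j in range(n):
--             idx  = (i - j) % n          # was (j-i): wrong
--             sign = 1 if j <= i else -1  # was j >= i: wrong
--             row.append((f[idx] * sign) % q)
--         mat.append(row)
--     return mat
-- ===== SOURCE B (Python) =====
-- def build_negacyclic_matrix(f, q, n):
--     # Build only the first row from f; every later row is the previous row
--     # rotated right with the wrapped element negated (negacyclic recurrence).
--     if n <= 0:
--         return []
--     row = [(f[(-j) % n] * (1 if j == 0 else -1)) % q for j in range(n)]
--     mat = [row]
--     for _ in range(n - 1):
--         row = [(-row[n - 1]) % q] + row[:n - 1]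
--         mat.append(row)
--     return mat
-- ===== Notes on version B (the rewrite author's own statement) =====
-- stated objective: alternative
-- what changed: Instead of evaluating the closed formula f[(i-j)%n]*sign % q at every cell, B computes only the first row and derives each subsequent row by a right-rotation that negates (mod q) the wrapped element, replacing n^2 index/multiply/mod operations by n per matrix plus list shifts.
import Mathlib
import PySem

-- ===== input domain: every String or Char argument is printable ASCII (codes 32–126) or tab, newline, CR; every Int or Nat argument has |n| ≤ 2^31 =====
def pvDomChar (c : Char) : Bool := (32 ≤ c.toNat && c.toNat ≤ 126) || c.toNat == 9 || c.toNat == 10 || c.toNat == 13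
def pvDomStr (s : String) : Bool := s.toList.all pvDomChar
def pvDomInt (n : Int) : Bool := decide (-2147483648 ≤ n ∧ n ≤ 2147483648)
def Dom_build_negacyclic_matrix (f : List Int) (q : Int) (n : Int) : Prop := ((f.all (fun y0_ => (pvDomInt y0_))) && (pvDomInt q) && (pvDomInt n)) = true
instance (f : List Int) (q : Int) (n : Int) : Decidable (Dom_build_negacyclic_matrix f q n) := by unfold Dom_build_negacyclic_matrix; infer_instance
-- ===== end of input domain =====

-- B builds only row 0 and derives each later row by a negacyclic right-rotation
-- (wrapped element negated mod q) instead of evaluating the closed formula per cell.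

-- ===== PORT A =====
def build_negacyclic_matrix (f : List Int) (q : Int) (n : Int) : List (List Int) :=
  (PySem.List.pyRange 0 n 1).foldl (fun mat i =>
    mat ++ [(PySem.List.pyRange 0 n 1).foldl (fun row j =>
      row ++ [PySem.Int.mod
        (PySem.List.pyGetD f (PySem.Int.mod (i - j) n) 0 * (if j ≤ i then 1 else -1)) q]) []]) []

-- ===== PORT B =====
def build_negacyclic_matrix_alt (f : List Int) (q : Int) (n : Int) : List (List Int) :=
  if n ≤ 0 then []
  else
    let row0 := (PySem.List.pyRange 0 n 1).map (fun j =>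
      PySem.Int.mod (PySem.List.pyGetD f (PySem.Int.mod (-j) n) 0 * (if j = 0 then 1 else -1)) q)
    ((PySem.List.pyRange 0 (n - 1) 1).foldl
      (fun (st : List (List Int) × List Int) _ =>
        let r := PySem.Int.mod (-(PySem.List.pyGetD st.2 (n - 1) 0)) q
                 :: PySem.List.slice st.2 none (some (n - 1))
        (st.1 ++ [r], r)) ([row0], row0)).1

-- ===== PRECONDITION & SPEC =====
-- Python A raises exactly when 0 < n and (q = 0: ZeroDivisionError, or n > len(f): IndexError).
def Pre_build_negacyclic_matrix (f : List Int) (q : Int) (n : Int) : Prop :=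
  0 < n → (q ≠ 0 ∧ n ≤ (f.length : Int))
instance (f : List Int) (q : Int) (n : Int) : Decidable (Pre_build_negacyclic_matrix f q n) := by unfold Pre_build_negacyclic_matrix; infer_instance
def pvWitness_build_negacyclic_matrix : List Int × Int × Int := ([1, 2], 5, 2)

def Spec_build_negacyclic_matrix (f : List Int) (q : Int) (n : Int) (out : List (List Int)) : Prop := out = build_negacyclic_matrix_alt f q n
instance (f : List Int) (q : Int) (n : Int) (out : List (List Int)) : Decidable (Spec_build_negacyclic_matrix f q n out) := by unfold Spec_build_negacyclic_matrix; infer_instance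

-- ===== CLAIM (what is proved, stated in full; the proofs are below) =====
def Claim_equal_build_negacyclic_matrix : Prop := ∀ (f : List Int) (q : Int) (n : Int), Dom_build_negacyclic_matrix f q n → Pre_build_negacyclic_matrix f q n → Spec_build_negacyclic_matrix f q n (build_negacyclic_matrix f q n)

-- ===== LEMMAS AND PROOFS =====

-- the common cell value C[i][j]
def pvEntry (f : List Int) (q n : Int) (i j : Int) : Int :=
  PySem.Int.mod (PySem.List.pyGetD f (PySem.Int.mod (i - j) n) 0 * (if j ≤ i then 1 else -1)) q

def pvRow (f : List Int) (q n : Int) (N : Nat) (i : Int) : List Int :=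
  (List.range N).map (fun (j : Nat) => pvEntry f q n i (j : Int))

theorem pv_pyRange_zero_toNat (n : Int) :
    PySem.List.pyRange 0 n 1 = (List.range n.toNat).map (fun (k : Nat) => (k : Int)) := by
  rcases (by omega : n ≤ 0 ∨ 0 < n) with h | h
  · have h0 : n.toNat = 0 := Int.toNat_of_nonpos h
    have he : PySem.List.pyRange 0 n 1 = [] := by
      simp [PySem.List.pyRange]
      omega
    simp [h0, he]
  · have : n = (n.toNat : Int) := (Int.toNat_of_nonneg h.le).symm
    rw [this]
    exact PySem.List.pyRange_zero_natCast n.toNat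

theorem pv_mod_congr (x y q : Int) (hq : q ≠ 0) (h : q ∣ (x - y)) :
    PySem.Int.mod x q = PySem.Int.mod y q := by
  have e1 := PySem.Int.floordiv_mul_add_mod x q
  have e2 := PySem.Int.floordiv_mul_add_mod y q
  have hd : q ∣ (PySem.Int.mod x q - PySem.Int.mod y q) := by
    obtain ⟨k, hk⟩ := h
    exact ⟨k - PySem.Int.floordiv x q + PySem.Int.floordiv y q, by linarith⟩
  have hb : |PySem.Int.mod x q - PySem.Int.mod y q| < |q| := by
    rcases lt_or_gt_of_ne hq with hneg | hpos
    · have b1 := PySem.Int.mod_neg_bounds x hneg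
      have b2 := PySem.Int.mod_neg_bounds y hneg
      rw [abs_of_nonpos hneg.le]
      rcases abs_cases (PySem.Int.mod x q - PySem.Int.mod y q) with ⟨ha, _⟩ | ⟨ha, _⟩ <;> omega
    · have b1 := PySem.Int.mod_nonneg x hpos
      have b2 := PySem.Int.mod_lt x hpos
      have b3 := PySem.Int.mod_nonneg y hpos
      have b4 := PySem.Int.mod_lt y hpos
      rw [abs_of_pos hpos]
      rcases abs_cases (PySem.Int.mod x q - PySem.Int.mod y q) with ⟨ha, _⟩ | ⟨ha, _⟩ <;> omega
  have : PySem.Int.mod x q - PySem.Int.mod y q = 0 := by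
    obtain ⟨k, hk⟩ := hd
    rcases eq_or_ne k 0 with rfl | hk0
    · simpa using hk
    · exfalso
      have h1 : (1 : Int) ≤ |k| := Int.one_le_abs hk0
      have : |q| ≤ |q * k| := by
        calc |q| = |q| * 1 := by ring
        _ ≤ |q| * |k| := by nlinarith [abs_nonneg q]
        _ = |q * k| := (abs_mul q k).symm
      rw [hk] at hb
      omega
  omega

theorem pv_A_eq (f : List Int) (q n : Int) :
    build_negacyclic_matrix f q n
      = (List.range n.toNat).map (fun (i : Nat) => pvRow f q n n.toNat (i : Int)) := by
  unfold build_negacyclic_matrix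
  rw [pv_pyRange_zero_toNat]
  simp only [List.foldl_map, PySem.List.foldl_append_singleton_eq_map, List.nil_append,
    pvRow, pvEntry]

theorem pv_row0_eq (f : List Int) (q n : Int) :
    ((List.range n.toNat).map (fun (k : Nat) => (k : Int))).map (fun j =>
      PySem.Int.mod (PySem.List.pyGetD f (PySem.Int.mod (-j) n) 0 * (if j = 0 then 1 else -1)) q)
    = pvRow f q n n.toNat 0 := by
  rw [List.map_map, pvRow]
  refine List.map_congr_left (fun k _ => ?_)
  simp only [Function.comp, pvEntry, zero_sub]
  congr 1
  rcases Nat.eq_zero_or_pos k with rfl | hk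
  · norm_num
  · have h1 : ¬ ((k : Int) = 0) := by omega
    have h2 : ¬ ((k : Int) ≤ 0) := by omega
    rw [if_neg h1, if_neg h2]

theorem pv_step_eq (f : List Int) (q n : Int) (hq : q ≠ 0) (hn : 0 < n) (i : Int)
    (hi0 : 0 ≤ i) (hi : i < n - 1) :
    PySem.Int.mod (-(PySem.List.pyGetD (pvRow f q n n.toNat i) (n - 1) 0)) q
        :: PySem.List.slice (pvRow f q n n.toNat i) none (some (n - 1))
      = pvRow f q n n.toNat (i + 1) := by
  set N := n.toNat with hN
  have hNn : (N : Int) = n := Int.toNat_of_nonneg hn.le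
  have hN1 : 1 ≤ N := by omega
  -- the picked element row[n-1]
  have hget : PySem.List.pyGetD (pvRow f q n N i) (n - 1) 0 = pvEntry f q n i ((N : Int) - 1) := by
    have : (n - 1) = ((N - 1 : Nat) : Int) := by omega
    have hlt : N - 1 < N := by omega
    rw [this, PySem.List.pyGetD_natCast, pvRow, List.getD_eq_getElem?_getD,
      List.getElem?_map, List.getElem?_range hlt]
    simp only [Option.map_some, Option.getD_some]
    congr 1
    omega
  -- the slice is the first N-1 cells
  have hslice : PySem.List.slice (pvRow f q n N i) none (some (n - 1))
      = (List.range (N - 1)).map (fun (j : Nat) => pvEntry f q n i (j : Int)) := by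
    rw [PySem.List.slice_to _ (by omega : (0:Int) ≤ n - 1), pvRow, ← List.map_take,
      List.take_range]
    congr 2
    omega
  -- unfold the target row
  have hsplit : pvRow f q n N (i + 1)
      = pvEntry f q n (i + 1) 0
          :: (List.range (N - 1)).map (fun (j : Nat) => pvEntry f q n (i + 1) ((j : Int) + 1)) := by
    rw [pvRow]
    have h1 : N = (N - 1) + 1 := by omega
    rw [h1, List.range_succ_eq_map, List.map_cons, List.map_map]
    push_cast
    rfl
  rw [hget, hslice, hsplit]
  congr 1
  · -- head: mod(-(f[(i-(n-1))%n] * -1 % q)) q = f[((i+1)-0)%n] * 1 % q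
    have hsign : ¬ (((N : Int) - 1) ≤ i) := by omega
    have hidx : PySem.Int.mod (i - ((N : Int) - 1)) n = PySem.Int.mod (i + 1) n := by
      apply pv_mod_congr _ _ _ (by omega)
      exact ⟨-1, by rw [show ((N : Int)) = n from hNn]; ring⟩
    have h0 : ((0:Int) ≤ i + 1) := by omega
    simp only [pvEntry, if_neg hsign, hidx, sub_zero, if_pos h0, mul_one, mul_neg_one]
    set a := PySem.List.pyGetD f (PySem.Int.mod (i + 1) n) 0 with ha
    have e := PySem.Int.floordiv_mul_add_mod (-a) q
    apply pv_mod_congr _ _ _ hq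
    exact ⟨PySem.Int.floordiv (-a) q, by linarith⟩
  · -- tail: shifting the index by one
    refine List.map_congr_left (fun j _ => ?_)
    simp only [pvEntry]
    have hidx : i + 1 - ((j : Int) + 1) = i - (j : Int) := by ring
    have hsign : ((j : Int) + 1 ≤ i + 1) ↔ ((j : Int) ≤ i) := by omega
    rw [hidx]
    by_cases hle : (j : Int) ≤ i
    · simp [hle, hsign.mpr hle]
    · simp [hle]

theorem pv_fold_inv (step : List Int → List Int) (rfn : Nat → List Int) (M : Nat)
    (h : ∀ m, m < M → step (rfn m) = rfn (m + 1)) :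
    (List.range M).foldl
        (fun (st : List (List Int) × List Int) (_ : Nat) => (st.1 ++ [step st.2], step st.2))
        ([rfn 0], rfn 0) =
      ((List.range (M + 1)).map rfn, rfn M) := by
  induction M with
  | zero => simp
  | succ M ih =>
    have ih' := ih (fun m hm => h m (by omega))
    rw [List.range_succ, List.foldl_append, ih']
    simp [h M (by omega), List.range_succ]

theorem pv_B_eq (f : List Int) (q n : Int) (hq : q ≠ 0) (hn : 0 < n) :
    build_negacyclic_matrix_alt f q n
      = (List.range n.toNat).map (fun (i : Nat) => pvRow f q n n.toNat (i : Int)) := by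
  set N := n.toNat with hN
  have hNn : (N : Int) = n := Int.toNat_of_nonneg hn.le
  have hN1 : 1 ≤ N := by omega
  rw [build_negacyclic_matrix_alt, if_neg (by omega)]
  simp only []
  rw [pv_pyRange_zero_toNat, pv_pyRange_zero_toNat]
  rw [pv_row0_eq f q n]
  have hM : (n - 1).toNat = N - 1 := by omega
  rw [hM]
  simp only [List.foldl_map]
  have := pv_fold_inv
    (fun row => PySem.Int.mod (-(PySem.List.pyGetD row (n - 1) 0)) q
                 :: PySem.List.slice row none (some (n - 1)))
    (fun (m : Nat) => pvRow f q n N (m : Int)) (N - 1)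
    (fun m hm => by
      have := pv_step_eq f q n hq hn (m : Int) (by positivity) (by omega)
      simpa using this)
  simp only [Nat.cast_zero, hN] at this ⊢
  rw [this]
  have h1 : N - 1 + 1 = N := by omega
  rw [h1]

-- ===== VERDICT (by name: the statement is the Claim_ definition above) =====
theorem build_negacyclic_matrix_spec : Claim_equal_build_negacyclic_matrix := by
  intro f q n _ hpre
  unfold Spec_build_negacyclic_matrix
  rcases (by omega : n ≤ 0 ∨ 0 < n) with h | h
  · rw [pv_A_eq, build_negacyclic_matrix_alt, if_pos h]
    simp [Int.toNat_of_nonpos h]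
  · obtain ⟨hq, _⟩ := hpre h
    rw [pv_A_eq, pv_B_eq f q n hq h]
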